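-- pv_equiv track=rewrite | github.com/SamBoerlijst/aparts | doc/APT.py | find_keywords
-- ===== SOURCE A (Python) =====
-- def find_keywords(keylist:list, text:str) ->list:
--     """
--     Scan a string for keywords from the given list.
--
--     Parameters:
--     -----------
--     keylist (list): List of stings containing the keywords of interest.
--
--     text (str): String of text to search for keywords.
--
--     Returns:
--     --------
--     text_keylist (list): List of strings containing the found keywords.
--     """
--     text_keylist = []
--     for i in range(len(keylist)):
--         index = text.find(f"{keylist[i]} ")
--         index1 = text.find(f" {keylist[i]}")
--         index2 = text.find(f"{keylist[i]}-")
--         index3 = text.find(f"-{keylist[i]}")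
--         index4 = text.find(f"{keylist[i]}.")
--         index5 = text.find(f".{keylist[i]}")
--         if (
--             index != -1
--             or index1 != -1
--             or index2 != -1
--             or index3 != -1
--             or index4 != -1
--             or index5 != -1
--         ):
--             text_keylist.append(keylist[i])
--     return text_keylist
-- ===== SOURCE B (Python) =====
-- DELIMS = " -."
--
-- def _adjacent(text, k):
--     n = len(text)
--     m = len(k)
--     i = text.find(k, 0)
--     while i != -1:
--         if (i > 0 and text[i-1] in DELIMS) or (i + m < n and text[i+m] in DELIMS):
--             return True
--         i = text.find(k, i + 1)
--     return False
--
-- def find_keywords(keylist, text):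
--     return [k for k in keylist if _adjacent(text, k)]
-- ===== Notes on version B (the rewrite author's own statement) =====
-- stated objective: alternative
-- what changed: Replaces A's six whole-text substring searches over composed patterns (keyword+delim, delim+keyword for ' ', '-', '.') by a single positional scan per keyword that tests an occurrence of the bare keyword and inspects its neighbouring characters for a delimiter.
import Mathlib
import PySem

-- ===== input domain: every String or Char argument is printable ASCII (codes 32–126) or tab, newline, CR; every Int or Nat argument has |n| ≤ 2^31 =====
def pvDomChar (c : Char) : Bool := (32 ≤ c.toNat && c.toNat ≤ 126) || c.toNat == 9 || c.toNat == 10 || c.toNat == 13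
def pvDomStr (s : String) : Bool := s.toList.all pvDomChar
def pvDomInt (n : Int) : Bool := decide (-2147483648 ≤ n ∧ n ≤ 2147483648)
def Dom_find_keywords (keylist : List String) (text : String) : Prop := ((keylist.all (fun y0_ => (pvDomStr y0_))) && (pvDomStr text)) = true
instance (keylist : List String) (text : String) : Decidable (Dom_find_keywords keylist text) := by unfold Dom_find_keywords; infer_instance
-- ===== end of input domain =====

-- B replaces A's six whole-text searches for composed patterns by a find-and-skip scan per
-- keyword that checks the characters adjacent to each occurrence (objective: alternative).

-- ===== PORT A =====
-- A: for each keyword, run text.find on the six patterns "k ", " k", "k-", "-k", "k.", ".k"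
-- and append the keyword if any find is ≠ -1.  (String ops on .toList via PySem.Chars.)
def find_keywords (keylist : List String) (text : String) : List String :=
  (PySem.List.pyRange 0 (keylist.length : Int)).foldl (fun text_keylist i =>
    let k := (PySem.List.pyGetD keylist i "").toList
    let t := text.toList
    let index  := PySem.Chars.find t (k ++ [' '])
    let index1 := PySem.Chars.find t ([' '] ++ k)
    let index2 := PySem.Chars.find t (k ++ ['-'])
    let index3 := PySem.Chars.find t (['-'] ++ k)
    let index4 := PySem.Chars.find t (k ++ ['.'])
    let index5 := PySem.Chars.find t (['.'] ++ k)
    if index ≠ -1 ∨ index1 ≠ -1 ∨ index2 ≠ -1 ∨ index3 ≠ -1 ∨ index4 ≠ -1 ∨ index5 ≠ -1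
    then text_keylist ++ [PySem.List.pyGetD keylist i ""] else text_keylist) []

-- ===== PORT B =====
def pvDelims : List Char := [' ', '-', '.']

-- termination facts for B's while loop (text.find(k, start) with a Nat start)
theorem pvFindFrom_gt (t k : List Char) (start : ℕ) (h : t.length < start) :
    PySem.Chars.findFrom t k (start : Int) none = -1 := by
  simp only [PySem.Chars.findFrom]
  have h1 : ¬ ((start : Int) < 0) := by omega
  rw [if_neg h1, if_pos (by exact_mod_cast h)]

theorem pvFindFrom_bounds (t k : List Char) (start : ℕ)
    (h : PySem.Chars.findFrom t k (start : Int) none ≠ -1) :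
    (start : Int) ≤ PySem.Chars.findFrom t k (start : Int) none ∧
      PySem.Chars.findFrom t k (start : Int) none ≤ t.length := by
  have hle : start ≤ t.length := by
    by_contra hgt
    exact h (pvFindFrom_gt t k start (by omega))
  rw [PySem.Chars.findFrom_natCast t k start hle] at h ⊢
  have hr := PySem.Chars.neg_one_le_find (t.drop start) k
  have hr2 := PySem.Chars.find_le_length (t.drop start) k
  rw [if_neg (by intro hc; exact h (by rw [if_pos hc]))]
  have hne : PySem.Chars.find (t.drop start) k ≠ -1 := by
    intro hc; exact h (by rw [if_pos hc])
  have : (0:Int) ≤ PySem.Chars.find (t.drop start) k := by omega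
  constructor
  · omega
  · have : ((t.drop start).length : Int) = (t.length : Int) - start := by
      simp [List.length_drop]; omega
    omega

-- B's helper _adjacent: 'i = text.find(k, start); while i != -1: check neighbours; i = text.find(k, i+1)'
def pvScan (t k : List Char) (start : ℕ) : Bool :=
  let i := PySem.Chars.findFrom t k (start : Int) none
  if h : i = -1 then false
  else
    let j := i.toNat
    if (decide (0 < j) && decide (t.getD (j - 1) ' ' ∈ pvDelims)) ||
       (decide (j + k.length < t.length) && decide (t.getD (j + k.length) ' ' ∈ pvDelims))
    then true
    else pvScan t k (j + 1)
termination_by t.length + 1 - start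
decreasing_by
  have hb := pvFindFrom_bounds t k start h
  omega

def find_keywords_alt (keylist : List String) (text : String) : List String :=
  keylist.filter (fun k => pvScan text.toList k.toList 0)

-- ===== PRECONDITION & SPEC =====
def Spec_find_keywords (keylist : List String) (text : String) (out : List String) : Prop := out = find_keywords_alt keylist text
instance (keylist : List String) (text : String) (out : List String) : Decidable (Spec_find_keywords keylist text out) := by unfold Spec_find_keywords; infer_instance

-- ===== CLAIM (what is proved, stated in full; the proofs are below) =====
def Claim_equal_find_keywords : Prop := ∀ (keylist : List String) (text : String), Dom_find_keywords keylist text → Spec_find_keywords keylist text (find_keywords keylist text)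

-- ===== LEMMAS AND PROOFS =====

-- appending a list gives prefix-of-drop decomposition
theorem pvPrefixAppend (a b s : List Char) : a ++ b <+: s ↔ a <+: s ∧ b <+: s.drop a.length := by
  constructor
  · rintro ⟨t, ht⟩
    exact ⟨⟨b ++ t, by rw [← ht]; simp⟩, ⟨t, by rw [← ht]; simp⟩⟩
  · rintro ⟨⟨t1, ht1⟩, ⟨t2, ht2⟩⟩
    refine ⟨t2, ?_⟩
    have ha : a = s.take a.length := List.prefix_iff_eq_take.mp ⟨t1, ht1⟩
    calc a ++ b ++ t2 = a ++ (b ++ t2) := by simp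
    _ = s.take a.length ++ s.drop a.length := by rw [← ha, ht2]
    _ = s := List.take_append_drop _ _

-- occurrence of k at i, phrased as take/drop
theorem pvOccIff (k t : List Char) (i : ℕ) :
    (t.drop i).take k.length = k ↔ k <+: t.drop i := by
  constructor
  · intro h
    refine ⟨(t.drop i).drop k.length, ?_⟩
    conv_rhs => rw [← List.take_append_drop k.length (t.drop i)]
    rw [h]
  · intro h; exact (List.prefix_iff_eq_take.mp h).symm

-- a single character is a prefix of drop j iff it is the character at j
theorem pvSinglePrefix (d : Char) (t : List Char) (j : ℕ) :
    [d] <+: t.drop j ↔ j < t.length ∧ t.getD j ' ' = d := by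
  constructor
  · rintro ⟨tail, ht⟩
    have hlen : 0 < (t.drop j).length := by rw [← ht]; simp
    have hj : j < t.length := by simpa using hlen
    refine ⟨hj, ?_⟩
    have : (t.drop j).getD 0 ' ' = d := by rw [← ht]; rfl
    simpa [List.getD_eq_getElem?_getD, List.getElem?_drop] using this
  · rintro ⟨hj, hd⟩
    have hcons : t.drop j = t[j] :: t.drop (j+1) := List.drop_eq_getElem_cons hj
    refine ⟨t.drop (j+1), ?_⟩
    rw [hcons]
    have hja : t[j] = d := by
      simpa [List.getD_eq_getElem?_getD, List.getElem?_eq_getElem hj] using hd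
    simp [hja]

-- infix = prefix of some drop (bridging PySem's isIn lemmas)
theorem pvInfixIff (t sub : List Char) : sub <:+: t ↔ ∃ j, sub <+: t.drop j := by
  rw [← PySem.Chars.isIn_iff_infix, ← PySem.Chars.exists_prefix_drop_iff_isIn]

-- 'k' followed by delimiter d occurs in t
theorem pvInfixPost (k : List Char) (d : Char) (t : List Char) :
    (k ++ [d]) <:+: t ↔ ∃ i, (t.drop i).take k.length = k ∧ i + k.length < t.length ∧ t.getD (i + k.length) ' ' = d := by
  rw [pvInfixIff]
  constructor
  · rintro ⟨j, hj⟩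
    rw [pvPrefixAppend] at hj
    obtain ⟨h1, h2⟩ := hj
    rw [List.drop_drop] at h2
    rw [pvSinglePrefix] at h2
    exact ⟨j, (pvOccIff k t j).mpr h1, h2.1, h2.2⟩
  · rintro ⟨i, h1, h2, h3⟩
    refine ⟨i, ?_⟩
    rw [pvPrefixAppend, List.drop_drop, pvSinglePrefix]
    exact ⟨(pvOccIff k t i).mp h1, h2, h3⟩

-- delimiter d followed by 'k' occurs in t
theorem pvInfixPre (d : Char) (k t : List Char) :
    ([d] ++ k) <:+: t ↔ ∃ i, 0 < i ∧ (t.drop i).take k.length = k ∧ i - 1 < t.length ∧ t.getD (i - 1) ' ' = d := by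
  rw [pvInfixIff]
  constructor
  · rintro ⟨j, hj⟩
    rw [pvPrefixAppend] at hj
    obtain ⟨h1, h2⟩ := hj
    rw [List.drop_drop] at h2
    rw [pvSinglePrefix] at h1
    exact ⟨j + 1, by omega, (pvOccIff k t (j+1)).mpr (by simpa using h2), by simpa using h1.1, by simpa using h1.2⟩
  · rintro ⟨i, h0, h1, h2, h3⟩
    refine ⟨i - 1, ?_⟩
    rw [pvPrefixAppend, List.drop_drop, pvSinglePrefix]
    have heq : i - 1 + 1 = i := by omega
    exact ⟨⟨h2, h3⟩, by simp only [List.length_singleton]; rw [heq]; exact (pvOccIff k t i).mp h1⟩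

-- B's while loop finds a delimiter-adjacent occurrence at some position ≥ start
theorem pvScanIff (t k : List Char) (start : ℕ) :
    pvScan t k start = true ↔ ∃ i, start ≤ i ∧ i < t.length + 1 ∧ (t.drop i).take k.length = k ∧
      ((0 < i ∧ t.getD (i - 1) ' ' ∈ pvDelims) ∨
       (i + k.length < t.length ∧ t.getD (i + k.length) ' ' ∈ pvDelims)) := by
  have H : ∀ fuel start, t.length + 1 - start ≤ fuel →
      (pvScan t k start = true ↔ ∃ i, start ≤ i ∧ i < t.length + 1 ∧ (t.drop i).take k.length = k ∧
        ((0 < i ∧ t.getD (i - 1) ' ' ∈ pvDelims) ∨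
         (i + k.length < t.length ∧ t.getD (i + k.length) ' ' ∈ pvDelims))) := by
    intro fuel
    induction fuel with
    | zero =>
      intro start h0
      have hgt : t.length < start := by omega
      rw [pvScan, dif_pos (pvFindFrom_gt t k start hgt)]
      simp only [Bool.false_eq_true, false_iff]
      rintro ⟨i, h1, h2, -, -⟩
      omega
    | succ f ih =>
      intro start hf
      by_cases hgt : t.length < start
      · rw [pvScan, dif_pos (pvFindFrom_gt t k start hgt)]
        simp only [Bool.false_eq_true, false_iff]
        rintro ⟨i, h1, h2, -, -⟩
        omega
      · have hle : start ≤ t.length := by omega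
        by_cases hmi : PySem.Chars.findFrom t k (start : Int) none = -1
        · rw [pvScan, dif_pos hmi]
          simp only [Bool.false_eq_true, false_iff]
          rintro ⟨i, h1, h2, hocc, -⟩
          have hnoinf := (PySem.Chars.findFrom_natCast_eq_neg_one_iff t k start hle).mp hmi
          refine hnoinf ?_
          have hpre : k <+: (t.drop start).drop (i - start) := by
            rw [List.drop_drop]
            have : start + (i - start) = i := by omega
            rw [this]
            exact (pvOccIff k t i).mp hocc
          exact (PySem.Chars.isIn_iff_infix k (t.drop start)).mp ((PySem.Chars.exists_prefix_drop_iff_isIn k (t.drop start)).mp ⟨i - start, hpre⟩)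
        · obtain ⟨hj1, hj2, hmin⟩ := PySem.Chars.findFrom_natCast_spec t k start hle hmi
          obtain ⟨hb1, hb2⟩ := pvFindFrom_bounds t k start hmi
          set F := PySem.Chars.findFrom t k (start : Int) none with hF
          set j := F.toNat with hjdef
          have hjs : start ≤ j := by omega
          have hjn : j ≤ t.length := by omega
          rw [pvScan, dif_neg hmi]
          by_cases hnb : ((decide (0 < j) && decide (t.getD (j - 1) ' ' ∈ pvDelims)) ||
              (decide (j + k.length < t.length) && decide (t.getD (j + k.length) ' ' ∈ pvDelims))) = true
          · rw [if_pos hnb]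
            simp only [true_iff]
            simp only [Bool.or_eq_true, Bool.and_eq_true, decide_eq_true_eq] at hnb
            exact ⟨j, hjs, by omega, (pvOccIff k t j).mpr hj2, hnb⟩
          · rw [if_neg hnb]
            rw [ih (j + 1) (by omega)]
            simp only [Bool.or_eq_true, Bool.and_eq_true, decide_eq_true_eq] at hnb
            push Not at hnb
            constructor
            · rintro ⟨i, h1, h2, hocc, hn⟩
              exact ⟨i, by omega, h2, hocc, hn⟩
            · rintro ⟨i, h1, h2, hocc, hn⟩
              refine ⟨i, ?_, h2, hocc, hn⟩
              rcases Nat.lt_or_ge i (j + 1) with hlt | hge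
              · rcases Nat.lt_or_ge i j with hlt2 | hge2
                · exact absurd ((pvOccIff k t i).mp hocc) (hmin i h1 hlt2)
                · have hij : i = j := by omega
                  subst hij
                  rcases hn with ⟨ha, hb⟩ | ⟨ha, hb⟩
                  · exact absurd hb (hnb.1 ha)
                  · exact absurd hb (hnb.2 ha)
              · exact hge
  exact H (t.length + 1) start (by omega)

-- the per-keyword conditions of A and B agree
theorem pvCondIff (k t : List Char) :
    (PySem.Chars.find t (k ++ [' ']) ≠ -1 ∨ PySem.Chars.find t ([' '] ++ k) ≠ -1 ∨
     PySem.Chars.find t (k ++ ['-']) ≠ -1 ∨ PySem.Chars.find t (['-'] ++ k) ≠ -1 ∨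
     PySem.Chars.find t (k ++ ['.']) ≠ -1 ∨ PySem.Chars.find t (['.'] ++ k) ≠ -1)
    ↔ pvScan t k 0 = true := by
  simp only [PySem.Chars.find_ne_neg_one_iff, pvInfixPost, pvInfixPre, pvScanIff]
  constructor
  · rintro (⟨i, h1, h2, h3⟩ | ⟨i, h0, h1, h2, h3⟩ | ⟨i, h1, h2, h3⟩ | ⟨i, h0, h1, h2, h3⟩ | ⟨i, h1, h2, h3⟩ | ⟨i, h0, h1, h2, h3⟩)
    · exact ⟨i, by omega, by omega, h1, Or.inr ⟨h2, by rw [h3]; simp [pvDelims]⟩⟩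
    · exact ⟨i, by omega, by omega, h1, Or.inl ⟨h0, by rw [h3]; simp [pvDelims]⟩⟩
    · exact ⟨i, by omega, by omega, h1, Or.inr ⟨h2, by rw [h3]; simp [pvDelims]⟩⟩
    · exact ⟨i, by omega, by omega, h1, Or.inl ⟨h0, by rw [h3]; simp [pvDelims]⟩⟩
    · exact ⟨i, by omega, by omega, h1, Or.inr ⟨h2, by rw [h3]; simp [pvDelims]⟩⟩
    · exact ⟨i, by omega, by omega, h1, Or.inl ⟨h0, by rw [h3]; simp [pvDelims]⟩⟩
  · rintro ⟨i, h00, hi, hocc, (⟨h0, hd⟩ | ⟨hlt, hd⟩)⟩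
    · have h2 : i - 1 < t.length := by omega
      simp only [pvDelims, List.mem_cons, List.not_mem_nil, or_false] at hd
      rcases hd with hd | hd | hd
      · exact Or.inr (Or.inl ⟨i, h0, hocc, h2, hd⟩)
      · exact Or.inr (Or.inr (Or.inr (Or.inl ⟨i, h0, hocc, h2, hd⟩)))
      · exact Or.inr (Or.inr (Or.inr (Or.inr (Or.inr ⟨i, h0, hocc, h2, hd⟩))))
    · simp only [pvDelims, List.mem_cons, List.not_mem_nil, or_false] at hd
      rcases hd with hd | hd | hd
      · exact Or.inl ⟨i, hocc, hlt, hd⟩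
      · exact Or.inr (Or.inr (Or.inl ⟨i, hocc, hlt, hd⟩))
      · exact Or.inr (Or.inr (Or.inr (Or.inr (Or.inl ⟨i, hocc, hlt, hd⟩))))

-- ===== VERDICT (by name: the statement is the Claim_ definition above) =====
theorem find_keywords_spec : Claim_equal_find_keywords := by
  intro keylist text _
  unfold Spec_find_keywords find_keywords find_keywords_alt
  rw [PySem.List.foldl_pyRange_zero_pyGetD' keylist ""
      (fun acc k => if (PySem.Chars.find text.toList (k.toList ++ [' ']) ≠ -1 ∨
        PySem.Chars.find text.toList ([' '] ++ k.toList) ≠ -1 ∨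
        PySem.Chars.find text.toList (k.toList ++ ['-']) ≠ -1 ∨
        PySem.Chars.find text.toList (['-'] ++ k.toList) ≠ -1 ∨
        PySem.Chars.find text.toList (k.toList ++ ['.']) ≠ -1 ∨
        PySem.Chars.find text.toList (['.'] ++ k.toList) ≠ -1)
        then acc ++ [k] else acc) []]
  have : ∀ (acc : List String) (l : List String),
      l.foldl (fun acc k => if (PySem.Chars.find text.toList (k.toList ++ [' ']) ≠ -1 ∨
        PySem.Chars.find text.toList ([' '] ++ k.toList) ≠ -1 ∨
        PySem.Chars.find text.toList (k.toList ++ ['-']) ≠ -1 ∨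
        PySem.Chars.find text.toList (['-'] ++ k.toList) ≠ -1 ∨
        PySem.Chars.find text.toList (k.toList ++ ['.']) ≠ -1 ∨
        PySem.Chars.find text.toList (['.'] ++ k.toList) ≠ -1)
        then acc ++ [k] else acc) acc
      = acc ++ l.filter (fun k => pvScan text.toList k.toList 0) := by
    intro acc l
    induction l generalizing acc with
    | nil => simp
    | cons x xs ih =>
      simp only [List.foldl_cons, List.filter_cons]
      by_cases h : pvScan text.toList x.toList 0 = true
      · rw [if_pos ((pvCondIff x.toList text.toList).mpr h), ih, h]
        simp
      · rw [if_neg (fun hc => h ((pvCondIff x.toList text.toList).mp hc)), ih]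
        simp [h]
  simpa using this [] keylist
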